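-- pv_equiv track=rewrite | github.com/priyanshu1344/SURE-Trust-Assignments | Assignment-2-15-03-2025/Strange Sort_ Alternating Smallest and Largest.py | strange_sort
-- ===== SOURCE A (Python) =====
-- def strange_sort(arr):
--     arr.sort()
--     left, right = 0, len(arr) - 1
--     result = []
--
--     while left <= right:
--         result.append(arr[left])
--         left += 1
--         if left <= right:
--             result.append(arr[right])
--             right -= 1
--
--     return result
-- ===== SOURCE B (Python) =====
-- def strange_sort(arr):
--     arr.sort()
--     mid = (len(arr) + 1) // 2
--     low = arr[:mid]
--     high = arr[mid:][::-1]
--     result = []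
--     for a, b in zip(low, high):
--         result.append(a)
--         result.append(b)
--     if len(high) < len(low):
--         result.append(low[-1])
--     return result
-- ===== Notes on version B (the rewrite author's own statement) =====
-- stated objective: idiomatic
-- what changed: Replaces the two-pointer index walk with a split of the sorted list into a lower half and a reversed upper half, interleaved by zip with a single tail append for odd lengths.
import Mathlib
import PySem

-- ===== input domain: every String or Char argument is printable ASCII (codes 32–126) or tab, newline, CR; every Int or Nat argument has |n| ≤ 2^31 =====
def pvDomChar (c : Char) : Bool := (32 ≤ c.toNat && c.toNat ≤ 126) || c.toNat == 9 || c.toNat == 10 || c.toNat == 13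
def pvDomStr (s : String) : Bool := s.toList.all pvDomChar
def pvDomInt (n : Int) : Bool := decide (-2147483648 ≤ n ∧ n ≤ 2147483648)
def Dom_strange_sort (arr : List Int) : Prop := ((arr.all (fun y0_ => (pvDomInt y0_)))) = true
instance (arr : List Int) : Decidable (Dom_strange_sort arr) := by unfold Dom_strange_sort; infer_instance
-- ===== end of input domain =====

-- B replaces A's two-pointer index walk by splitting the sorted list into a lower half and a
-- reversed upper half and interleaving them (zip + tail append). Idiomatic decomposition, same cost.
-- Both A and B sort the argument in place; the equivalence proved is about the return value.


-- ===== PORT A =====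
-- the while loop: left/right pointers, appending arr[left] then (if still in range) arr[right].
-- indices are always in range when the loop body runs, so '.getD 0' is never the value used.
def pvLoopA (s : List Int) (left right : Int) (result : List Int) : List Int :=
  if left ≤ right then
    let result := result ++ [(PySem.List.pyGet? s left).getD 0]
    if left + 1 ≤ right then
      pvLoopA s (left + 1) (right - 1) (result ++ [(PySem.List.pyGet? s right).getD 0])
    else result
  else result
termination_by (right + 1 - left).toNat
decreasing_by omega

def strange_sort (arr : List Int) : List Int :=
  let s := PySem.List.sorted arr (fun x => x) false
  pvLoopA s 0 ((s.length : Int) - 1) []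

-- ===== PORT B =====
def strange_sort_alt (arr : List Int) : List Int :=
  let s := PySem.List.sorted arr (fun x => x) false
  let mid : Int := PySem.Int.floordiv ((s.length : Int) + 1) 2
  let low := PySem.List.slice s none (some mid)
  -- arr[mid:][::-1] : slice? with step -1 is total here (step ≠ 0), hence the '.getD []'
  let high := (PySem.List.slice? (PySem.List.slice s (some mid) none) none none (-1)).getD []
  let result := (low.zip high).foldl (fun acc p => acc ++ [p.1, p.2]) []
  if high.length < low.length then result ++ [(PySem.List.pyGet? low (-1)).getD 0] else result

-- ===== PRECONDITION & SPEC =====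
def Spec_strange_sort (arr : List Int) (out : List Int) : Prop := out = strange_sort_alt arr
instance (arr : List Int) (out : List Int) : Decidable (Spec_strange_sort arr out) := by unfold Spec_strange_sort; infer_instance

-- ===== CLAIM (what is proved, stated in full; the proofs are below) =====
def Claim_equal_strange_sort : Prop := ∀ (arr : List Int), Dom_strange_sort arr → Spec_strange_sort arr (strange_sort arr)

-- ===== LEMMAS AND PROOFS =====

-- the common description of both results: first, last, second, second-last, …
-- (helper lemmas below; pvAlt, pvZFlat, pvBcore are proof-only abstractions)
def pvAlt : List Int → List Int
  | [] => []
  | x :: xs => if xs = [] then [x] else x :: xs.getLastD 0 :: pvAlt xs.dropLast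
termination_by l => l.length
decreasing_by simp [List.length_dropLast]

def pvZFlat : List (Int × Int) → List Int
  | [] => []
  | p :: ps => p.1 :: p.2 :: pvZFlat ps

theorem pv_foldl_zflat (ps : List (Int × Int)) (acc : List Int) :
    ps.foldl (fun acc p => acc ++ [p.1, p.2]) acc = acc ++ pvZFlat ps := by
  induction ps generalizing acc with
  | nil => simp [pvZFlat]
  | cons p ps ih => simp [pvZFlat, List.foldl_cons, ih]

-- B's core on the sorted list, in take/drop form
def pvBcore (t : List Int) : List Int :=
  let m := (t.length + 1) / 2
  let low := t.take m
  let high := (t.drop m).reverse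
  let out := pvZFlat (low.zip high)
  if high.length < low.length then out ++ [low.getLastD 0] else out

theorem pv_getLastD_ne_nil (l : List Int) (h : l ≠ []) (d : Int) : l.getLastD d = l.getLast h := by
  cases l with
  | nil => simp at h
  | cons a l => simp [List.getLastD_eq_getLast?, List.getLast?_eq_some_getLast (h := h)]

theorem pv_bcore_aux (n : Nat) : ∀ (t : List Int), t.length ≤ n → pvBcore t = pvAlt t := by
  induction n with
  | zero =>
    intro t ht
    have h0 : t = [] := List.eq_nil_of_length_eq_zero (by omega)
    subst h0
    simp [pvBcore, pvAlt, pvZFlat]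
  | succ n ih =>
    intro t ht
    match t with
    | [] => simp [pvBcore, pvAlt, pvZFlat]
    | [x] => simp [pvBcore, pvAlt, pvZFlat]
    | x :: y0 :: ys =>
      generalize hxsdef : y0 :: ys = xs at *
      have hxs : xs ≠ [] := by rw [← hxsdef]; simp
      have hlenxs : 1 ≤ xs.length := by rw [← hxsdef]; simp
      have hgl : xs.getLastD 0 = xs.getLast hxs := pv_getLastD_ne_nil xs hxs 0
      have hdll : xs.dropLast.length = xs.length - 1 := List.length_dropLast
      have hm2 : xs.length / 2 ≤ xs.length - 1 := by omega
      have hsplit : xs.dropLast ++ [xs.getLast hxs] = xs := List.dropLast_concat_getLast hxs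
      have hdrop : ∀ k : Nat, k ≤ xs.dropLast.length →
          xs.drop k = xs.dropLast.drop k ++ [xs.getLast hxs] := by
        intro k hk
        conv_lhs => rw [← hsplit]
        rw [List.drop_append_of_le_length hk]
      have htake : ∀ k : Nat, k ≤ xs.dropLast.length →
          xs.take k = xs.dropLast.take k := by
        intro k hk
        conv_lhs => rw [← hsplit]
        rw [List.take_append_of_le_length hk]
      have hIH : pvBcore xs.dropLast = pvAlt xs.dropLast := by
        apply ih
        rw [← hxsdef] at ht ⊢
        simp at ht ⊢
        omega
      rw [pvAlt, if_neg hxs, hgl, ← hIH]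
      simp only [pvBcore]
      rw [show ((x :: xs).length + 1) / 2 = xs.length / 2 + 1 from by simp; omega]
      rw [show (xs.dropLast.length + 1) / 2 = xs.length / 2 from by omega]
      rw [List.take_succ_cons, List.drop_succ_cons,
        hdrop (xs.length / 2) (by omega), htake (xs.length / 2) (by omega),
        List.reverse_append]
      simp only [List.reverse_cons, List.reverse_nil, List.nil_append, List.cons_append,
        List.zip_cons_cons, pvZFlat]
      have hcond : ((xs.getLast hxs :: (xs.dropLast.drop (xs.length / 2)).reverse).length <
            (x :: xs.dropLast.take (xs.length / 2)).length)
          ↔ (((xs.dropLast.drop (xs.length / 2)).reverse).length <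
            (xs.dropLast.take (xs.length / 2)).length) := by
        simp
      by_cases hc : ((xs.dropLast.drop (xs.length / 2)).reverse).length <
          (xs.dropLast.take (xs.length / 2)).length
      · rw [if_pos (hcond.mpr hc), if_pos hc]
        have htk : xs.dropLast.take (xs.length / 2) ≠ [] := by
          apply List.ne_nil_of_length_pos
          simp at hc ⊢
          omega
        rw [List.getLastD_cons, pv_getLastD_ne_nil _ htk x, pv_getLastD_ne_nil _ htk 0]
      · rw [if_neg (fun h => hc (hcond.mp h)), if_neg hc]

theorem pv_bcore_eq_alt (t : List Int) : pvBcore t = pvAlt t :=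
  pv_bcore_aux t.length t le_rfl

theorem pv_seg_cons (s : List Int) (a k : Nat) (ha : a < s.length) (hk : 1 ≤ k) :
    (s.drop a).take k = s[a] :: (s.drop (a+1)).take (k-1) := by
  obtain ⟨k', rfl⟩ : ∃ k', k = k' + 1 := ⟨k - 1, by omega⟩
  rw [List.drop_eq_getElem_cons ha, List.take_succ_cons]
  simp

theorem pv_seg_getLastD (s : List Int) (a k : Nat) (hk : 1 ≤ k) (hak : a + k ≤ s.length) :
    ((s.drop a).take k).getLastD 0 = s[a + k - 1]'(by omega) := by
  rw [List.getLastD_eq_getLast?, List.getLast?_eq_getElem?]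
  have hl : ((s.drop a).take k).length = k := by simp; omega
  rw [hl, List.getElem?_take_of_lt (by omega), List.getElem?_drop]
  rw [show a + (k - 1) = a + k - 1 from by omega, List.getElem?_eq_getElem (by omega)]
  rfl

theorem pv_take_dropLast (l : List Int) (k : Nat) (h : k ≤ l.length) :
    (l.take k).dropLast = l.take (k - 1) := by
  rw [List.dropLast_eq_take, List.take_take, List.length_take]
  congr 1
  omega

theorem pv_loopA_eq (k : Nat) : ∀ (s : List Int) (i j : Nat) (res : List Int),
    j < s.length → j + 1 - i ≤ k →
    pvLoopA s i j res = res ++ pvAlt ((s.drop i).take (j + 1 - i)) := by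
  induction k with
  | zero =>
    intro s i j res hj hk
    rw [pvLoopA, if_neg (by exact_mod_cast (by omega : ¬ (i ≤ j)))]
    simp [show j + 1 - i = 0 from by omega, pvAlt]
  | succ k ih =>
    intro s i j res hj hk
    by_cases hij : i ≤ j
    · have hgeti : (PySem.List.pyGet? s (i : Int)).getD 0 = s[i]'(by omega) := by
        rw [PySem.List.pyGet?_natCast, List.getElem?_eq_getElem (by omega)]
        rfl
      by_cases h2 : i + 1 ≤ j
      · have hgetj : (PySem.List.pyGet? s (j : Int)).getD 0 = s[j]'(by omega) := by
          rw [PySem.List.pyGet?_natCast, List.getElem?_eq_getElem (by omega)]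
          rfl
        rw [pvLoopA, if_pos (by exact_mod_cast hij)]
        simp only [hgeti, hgetj]
        rw [if_pos (by omega)]
        rw [show ((i : Int) + 1) = ((i + 1 : Nat) : Int) from by push_cast; ring,
            show ((j : Int) - 1) = ((j - 1 : Nat) : Int) from by omega]
        rw [ih s (i+1) (j-1) _ (by omega) (by omega)]
        rw [show (j - 1) + 1 - (i + 1) = j - i - 1 from by omega]
        rw [pv_seg_cons s i (j + 1 - i) (by omega) (by omega)]
        rw [pvAlt]
        rw [if_neg (by
          apply List.ne_nil_of_length_pos
          simp
          omega)]
        rw [show j + 1 - i - 1 = j - i from by omega]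
        rw [pv_seg_getLastD s (i+1) (j-i) (by omega) (by omega)]
        rw [pv_take_dropLast _ (j-i) (by simp; omega)]
        have hidx : s[i + 1 + (j - i) - 1]'(by omega) = s[j]'(by omega) := by
          congr 1
          omega
        rw [hidx]
        simp
      · have hieqj : i = j := by omega
        subst hieqj
        rw [pvLoopA, if_pos (by exact_mod_cast hij), if_neg (by omega)]
        simp only [hgeti]
        rw [show i + 1 - i = 1 from by omega, pv_seg_cons s i 1 (by omega) le_rfl]
        simp [pvAlt]
    · rw [pvLoopA, if_neg (by exact_mod_cast hij)]
      simp [show j + 1 - i = 0 from by omega, pvAlt]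

theorem pv_A_eq_alt (t : List Int) : pvLoopA t 0 ((t.length : Int) - 1) [] = pvAlt t := by
  cases t with
  | nil =>
    rw [pvLoopA]
    norm_num [pvAlt]
  | cons x xs =>
    have h1 : (((x :: xs).length : Int) - 1) = (((x :: xs).length - 1 : Nat) : Int) := by
      rw [List.length_cons]
      omega
    rw [h1, show ((0 : Int)) = ((0 : Nat) : Int) from rfl]
    rw [pv_loopA_eq ((x :: xs).length) (x :: xs) 0 ((x :: xs).length - 1) [] (by simp) (by omega)]
    simp

theorem pv_B_eq_bcore (arr : List Int) :
    strange_sort_alt arr = pvBcore (PySem.List.sorted arr (fun x => x) false) := by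
  unfold strange_sort_alt pvBcore
  have hm : PySem.Int.floordiv (((PySem.List.sorted arr (fun x => x) false).length : Int) + 1) 2
      = ((((PySem.List.sorted arr (fun x => x) false).length + 1) / 2 : Nat) : Int) := by
    exact_mod_cast PySem.Int.floordiv_natCast _ 2
  simp only [hm, PySem.List.slice_to_natCast, PySem.List.slice_from_natCast,
    PySem.List.slice?_none_none_neg_one, Option.getD_some, pv_foldl_zflat, List.nil_append,
    PySem.List.pyGet?_neg_one, List.getLastD_eq_getLast?]

-- ===== VERDICT (by name: the statement is the Claim_ definition above) =====
theorem strange_sort_spec : Claim_equal_strange_sort := by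
  intro arr _
  simp only [Spec_strange_sort, strange_sort]
  rw [pv_B_eq_bcore, pv_bcore_eq_alt, pv_A_eq_alt]
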